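-- pv_equiv track=rewrite | github.com/haylahi/CaptchaXpert | CaptchaResolver/solutions/tools/pre_processing/plist.py | indexN
-- ===== SOURCE A (Python) =====
-- def indexN(list_: list, value, n=1, reversed: bool = False) -> list or int or str:
--     """
--     Find x without raising ValueError
--     :param list_: list of items
--     :param value: value to be found
--     :return: indexes if n > 1 else indexes[0] if len(indexes) == 1 else 'Not Found'
--     """
--
--     if reversed:
--         list_ = list_[::-1]
--
--     indexes = []
--     i = 0
--     for _ in range(n):
--         try:
--             i = list_.index(value, i)
--             indexes.append(i)
--             i += 1
--         except ValueError:
--             pass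
--
--     if reversed:
--         indexes = [len(list_) - 1 - y for y in indexes]
--
--     return indexes if n > 1 else indexes[0] if len(indexes) == 1 else 'Not Found'
-- ===== SOURCE B (Python) =====
-- def indexN(list_: list, value, n=1, reversed: bool = False) -> list or int or str:
--     """Single comparison scan (forward or backward) collecting up to n matching
--     indices, instead of n resumed list.index calls on a sliced copy."""
--     rng = range(len(list_) - 1, -1, -1) if reversed else range(len(list_))
--     result = []
--     if n > 0:
--         for i in rng:
--             if list_[i] == value:
--                 result.append(i)
--                 if len(result) == n:
--                     break
--     return result if n > 1 else result[0] if len(result) == 1 else 'Not Found'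
-- ===== Notes on version B (the rewrite author's own statement) =====
-- stated objective: faster
-- what changed: A calls list.index(value, i) n times (after copying the list with [::-1] and remapping indices for reversed); B makes one direct comparison scan over the indices, forward or backward, appending matches and breaking after n hits; B reproduces A's int/'Not Found' returns for n<=1 exactly in Python.
-- outside the precondition, e.g. on indexN([5, 7, 5], 5, 1, False): A returns 0, B returns 0; on indexN([], 5, 1, False): A returns 'Not Found', B returns 'Not Found'; on indexN([4, 9], 9, 0, True): A returns 'Not Found', B returns 'Not Found'
import Mathlib
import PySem

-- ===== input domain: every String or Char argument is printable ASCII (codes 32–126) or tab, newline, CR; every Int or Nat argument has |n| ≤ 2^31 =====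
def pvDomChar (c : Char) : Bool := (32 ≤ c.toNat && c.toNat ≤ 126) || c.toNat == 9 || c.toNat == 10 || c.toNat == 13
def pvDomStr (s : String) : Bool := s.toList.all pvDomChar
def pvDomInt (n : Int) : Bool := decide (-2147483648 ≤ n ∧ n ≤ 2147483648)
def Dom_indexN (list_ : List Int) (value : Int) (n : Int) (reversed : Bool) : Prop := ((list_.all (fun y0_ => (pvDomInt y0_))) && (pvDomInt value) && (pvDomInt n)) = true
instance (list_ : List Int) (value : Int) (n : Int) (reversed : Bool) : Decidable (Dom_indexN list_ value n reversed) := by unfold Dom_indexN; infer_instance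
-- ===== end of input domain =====

-- B replaces A's n resumed list.index calls (on a reversed copy, with index remapping)
-- by one direct comparison scan, forward or backward, that stops after n matches.


-- ===== PORT A =====
-- Python's list_.index(value, i) for 0 ≤ i: first index ≥ i holding value (exact for a
-- nonnegative start, which is all A ever passes); none = ValueError.
def pyIndexFrom? (xs : List Int) (v : Int) (i : Nat) : Option Nat :=
  (PySem.List.index? (xs.drop i) v).map (· + i)

-- indexes = []; i = 0; for _ in range(n): try: i = list_.index(value, i); indexes.append(i); i += 1
-- except ValueError: pass
def indexN_core (l : List Int) (value : Int) (n : Int) : List Int :=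
  ((PySem.List.pyRange 0 n 1).foldl
    (fun (st : List Int × Nat) _ =>
      match pyIndexFrom? l value st.2 with
      | some j => (st.1 ++ [(j : Int)], j + 1)
      | none => st)
    ([], 0)).1

def indexN (list_ : List Int) (value : Int) (n : Int) (reversed : Bool) : List Int :=
  -- if reversed: list_ = list_[::-1]
  let l := if reversed then list_.reverse else list_
  -- if reversed: indexes = [len(list_) - 1 - y for y in indexes]
  -- return indexes  (the n > 1 branch; for n ≤ 1 Python returns an int or a string — outside Pre_)
  if reversed then (indexN_core l value n).map (fun y => (l.length : Int) - 1 - y)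
  else indexN_core l value n

-- ===== PORT B =====
-- if n > 0: for i in rng: if list_[i] == value: result.append(i); if len(result) == n: break
def indexN_altLoop (list_ : List Int) (value : Int) (n : Int) : List Int → List Int → List Int
  | acc, [] => acc
  | acc, i :: rest =>
    if PySem.List.pyGetD list_ i 0 == value then
      let acc' := acc ++ [i]
      if (acc'.length : Int) == n then acc' else indexN_altLoop list_ value n acc' rest
    else indexN_altLoop list_ value n acc rest

def indexN_alt (list_ : List Int) (value : Int) (n : Int) (reversed : Bool) : List Int :=
  -- rng = range(len(list_) - 1, -1, -1) if reversed else range(len(list_))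
  let rng := if reversed then PySem.List.pyRange ((list_.length : Int) - 1) (-1) (-1)
             else PySem.List.pyRange 0 (list_.length : Int) 1
  -- result = []; if n > 0: scan; return result  (the n > 1 branch, as in A)
  if 0 < n then indexN_altLoop list_ value n [] rng else []

-- ===== PRECONDITION & SPEC =====
-- Pre_ excludes exactly n ≤ 1, where the Python A returns an int (indexes[0]) or the string
-- 'Not Found' — values the declared list[int] / List Int return type of this port cannot
-- represent; the Python B returns those same int/string values there (see the cites).
def Pre_indexN (list_ : List Int) (value : Int) (n : Int) (reversed : Bool) : Prop := 1 < n
instance (list_ : List Int) (value : Int) (n : Int) (reversed : Bool) : Decidable (Pre_indexN list_ value n reversed) := by unfold Pre_indexN; infer_instance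

def pvWitness_indexN : List Int × Int × Int × Bool := ([1, 2, 1, 3], 1, 2, true)

def Spec_indexN (list_ : List Int) (value : Int) (n : Int) (reversed : Bool) (out : List Int) : Prop := out = indexN_alt list_ value n reversed
instance (list_ : List Int) (value : Int) (n : Int) (reversed : Bool) (out : List Int) : Decidable (Spec_indexN list_ value n reversed out) := by unfold Spec_indexN; infer_instance

-- ===== CLAIM (what is proved, stated in full; the proofs are below) =====
def Claim_equal_indexN : Prop := ∀ (list_ : List Int) (value : Int) (n : Int) (reversed : Bool), Dom_indexN list_ value n reversed → Pre_indexN list_ value n reversed → Spec_indexN list_ value n reversed (indexN list_ value n reversed)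

-- ===== LEMMAS AND PROOFS =====

-- The sequence of indices A's resumed-index loop produces with fuel m, starting at i.
def firstsN (l : List Int) (v : Int) : Nat → Nat → List Nat
  | 0, _ => []
  | m + 1, i =>
    match pyIndexFrom? l v i with
    | some j => j :: firstsN l v m (j + 1)
    | none => []

lemma firstsN_of_none {l : List Int} {v : Int} {i : Nat} (h : pyIndexFrom? l v i = none) :
    ∀ m, firstsN l v m i = [] := by
  intro m; cases m with
  | zero => rfl
  | succ m => simp only [firstsN, h]

lemma firstsN_ge_len (l : List Int) (v : Int) (m : Nat) {i : Nat} (h : l.length ≤ i) :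
    firstsN l v m i = [] := by
  apply firstsN_of_none
  simp [pyIndexFrom?, PySem.List.index?, List.drop_eq_nil_of_le h]

-- skipping a non-matching position does not change the search
lemma pyIndexFrom?_skip {l : List Int} {v : Int} {i : Nat} (hi : i < l.length)
    (hne : (l[i] == v) = false) : pyIndexFrom? l v i = pyIndexFrom? l v (i + 1) := by
  have hd : l.drop i = l[i] :: l.drop (i + 1) := List.drop_eq_getElem_cons hi
  simp only [pyIndexFrom?, PySem.List.index?, hd, List.idxOf?_cons, hne, Bool.false_eq_true,
    if_false, Option.map_map]
  cases List.idxOf? v (l.drop (i + 1)) with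
  | none => rfl
  | some k => simp; omega

lemma firstsN_skip {l : List Int} {v : Int} {i : Nat} (hi : i < l.length)
    (hne : (l[i] == v) = false) (m : Nat) : firstsN l v m i = firstsN l v m (i + 1) := by
  cases m with
  | zero => rfl
  | succ m => simp only [firstsN, pyIndexFrom?_skip hi hne]

lemma firstsN_hit {l : List Int} {v : Int} {i : Nat} (hi : i < l.length)
    (heq : (l[i] == v) = true) (m : Nat) : firstsN l v (m + 1) i = i :: firstsN l v m (i + 1) := by
  have hd : l.drop i = l[i] :: l.drop (i + 1) := List.drop_eq_getElem_cons hi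
  simp only [firstsN, pyIndexFrom?, PySem.List.index?, hd, List.idxOf?_cons, heq, if_true]
  simp

-- A's loop characterisation: folding the step over any fuel list from (acc, i)
lemma A_loop (l : List Int) (v : Int) : ∀ (ts : List Int) (acc : List Int) (i : Nat),
    (ts.foldl (fun (st : List Int × Nat) _ =>
      match pyIndexFrom? l v st.2 with
      | some j => (st.1 ++ [(j : Int)], j + 1)
      | none => st) (acc, i)).1
    = acc ++ (firstsN l v ts.length i).map (fun j => (j : Int)) := by
  intro ts
  induction ts with
  | nil =>
    intro acc i
    rw [show firstsN l v ([] : List Int).length i = [] from rfl]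
    simp
  | cons t ts ih =>
    intro acc i
    simp only [List.foldl_cons, List.length_cons]
    cases h : pyIndexFrom? l v i with
    | some j =>
      rw [ih]
      simp [firstsN, h]
    | none =>
      rw [ih, firstsN_of_none h, firstsN_of_none h]

lemma indexN_core_eq (l : List Int) (v n : Int) :
    indexN_core l v n = (firstsN l v n.toNat 0).map (fun j => (j : Int)) := by
  unfold indexN_core
  rw [A_loop, PySem.List.length_pyRange_one]
  simp

-- B's forward scan characterisation
lemma B_fwd (l : List Int) (v : Int) (n : Int) :
    ∀ (k : Nat) (i : Nat) (acc : List Int), l.length = i + k → (acc.length : Int) < n →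
    indexN_altLoop l v n acc (PySem.List.pyRange (i : Int) (l.length : Int) 1)
      = acc ++ (firstsN l v (n.toNat - acc.length) i).map (fun j => (j : Int)) := by
  intro k
  induction k with
  | zero =>
    intro i acc hlen hacc
    rw [PySem.List.pyRange_one_eq_nil (by omega), firstsN_ge_len l v _ (by omega)]
    simp [indexN_altLoop]
  | succ k ih =>
    intro i acc hlen hacc
    have hi : i < l.length := by omega
    rw [PySem.List.pyRange_one_cons (by exact_mod_cast hi)]
    have hget : PySem.List.pyGetD l (i : Int) 0 = l[i] := by
      rw [PySem.List.pyGetD_eq_getElem l 0 (by omega) (by exact_mod_cast hi)]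
      simp
    have hm : ∃ m, n.toNat - acc.length = m + 1 := ⟨n.toNat - acc.length - 1, by omega⟩
    obtain ⟨m, hm⟩ := hm
    by_cases hv : (l[i] == v) = true
    · simp only [indexN_altLoop, hget, hv, if_true]
      by_cases hfull : ((acc ++ [(i : Int)]).length : Int) = n
      · have hb : (((acc ++ [(i : Int)]).length : Int) == n) = true := by simpa using hfull
        rw [hb, if_pos rfl, hm, firstsN_hit hi hv]
        have : m = 0 := by simp at hfull; omega
        subst this
        rw [show firstsN l v 0 (i + 1) = [] from rfl]
        simp
      · have hb : (((acc ++ [(i : Int)]).length : Int) == n) = false := by simpa using hfull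
        rw [hb, if_neg Bool.false_ne_true]
        rw [show ((i : Int) + 1) = ((i + 1 : Nat) : Int) by push_cast; ring]
        rw [ih (i + 1) (acc ++ [(i : Int)]) (by omega) (by simp at hfull ⊢; omega)]
        rw [hm, firstsN_hit hi hv]
        rw [show n.toNat - (acc ++ [(i : Int)]).length = m by simp; omega]
        simp
    · have hvf : (l[i] == v) = false := by simpa using hv
      simp only [indexN_altLoop, hget, hvf, Bool.false_eq_true, if_false]
      rw [show ((i : Int) + 1) = ((i + 1 : Nat) : Int) by push_cast; ring]
      rw [ih (i + 1) acc (by omega) hacc, firstsN_skip hi hvf]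

-- B's backward scan characterisation, phrased against firstsN on the reversed list
lemma B_rev (l : List Int) (v : Int) (n : Int) :
    ∀ (k : Nat) (i : Int) (acc : List Int), i + 1 = (k : Int) → (k : Int) ≤ (l.length : Int) →
    (acc.length : Int) < n →
    indexN_altLoop l v n acc (PySem.List.pyRange i (-1) (-1))
      = acc ++ (firstsN l.reverse v (n.toNat - acc.length) (l.length - k)).map
          (fun j => (l.length : Int) - 1 - (j : Int)) := by
  intro k
  induction k with
  | zero =>
    intro i acc hik hk hacc
    rw [PySem.List.pyRange_neg_one_eq_nil (by omega)]
    rw [firstsN_ge_len l.reverse v _ (by simp)]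
    simp [indexN_altLoop]
  | succ k ih =>
    intro i acc hik hk hacc
    have hi0 : 0 ≤ i := by omega
    have hilen : i < (l.length : Int) := by omega
    rw [PySem.List.pyRange_neg_one_cons (by omega)]
    -- the scanned position, seen from the reversed list
    set p : Nat := l.length - (k + 1) with hp
    have hklen : k < l.length := by exact_mod_cast (by omega : (k : Int) < (l.length : Int))
    have hpl : p < l.length := by omega
    have hplr : p < l.reverse.length := by simpa using hpl
    have hget : PySem.List.pyGetD l i 0 = l.reverse[p] := by
      rw [PySem.List.pyGetD_eq_getElem l 0 hi0 hilen, List.getElem_reverse]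
      congr 1; omega
    have hm : ∃ m, n.toNat - acc.length = m + 1 := ⟨n.toNat - acc.length - 1, by omega⟩
    obtain ⟨m, hm⟩ := hm
    have hcast : ((l.length : Int) - 1 - (p : Int)) = i := by omega
    have h2 : l.length - k = p + 1 := by omega
    by_cases hv : (l.reverse[p] == v) = true
    · simp only [indexN_altLoop, hget, hv, if_true]
      by_cases hfull : ((acc ++ [i]).length : Int) = n
      · have hb : (((acc ++ [i]).length : Int) == n) = true := by simpa using hfull
        rw [hb, if_pos rfl, hm, firstsN_hit hplr hv]
        have : m = 0 := by simp at hfull; omega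
        subst this
        rw [show firstsN l.reverse v 0 (p + 1) = [] from rfl]
        simp [hcast]
      · have hb : (((acc ++ [i]).length : Int) == n) = false := by simpa using hfull
        rw [hb, if_neg Bool.false_ne_true]
        rw [ih (i - 1) (acc ++ [i]) (by omega) (by omega) (by simp at hfull ⊢; omega)]
        rw [hm, firstsN_hit hplr hv]
        rw [show n.toNat - (acc ++ [i]).length = m by simp; omega, h2]
        simp [hcast]
    · have hvf : (l.reverse[p] == v) = false := by simpa using hv
      simp only [indexN_altLoop, hget, hvf, Bool.false_eq_true, if_false]
      rw [ih (i - 1) acc (by omega) (by omega) hacc, h2, firstsN_skip hplr hvf]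

-- ===== VERDICT (by name: the statement is the Claim_ definition above) =====
theorem indexN_spec : Claim_equal_indexN := by
  intro list_ value n reversed _hdom hpre
  have hn : 0 < n := by unfold Pre_indexN at hpre; omega
  unfold Spec_indexN indexN indexN_alt
  rw [if_pos hn]
  cases reversed with
  | false =>
    simp only [Bool.false_eq_true, if_false]
    rw [indexN_core_eq]
    have hB := B_fwd list_ value n list_.length 0 [] (by omega) (by simpa using hn)
    simp only [Nat.cast_zero, List.length_nil, Nat.sub_zero, List.nil_append] at hB
    rw [hB]
  | true =>
    simp only [if_true]
    rw [indexN_core_eq]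
    have hB := B_rev list_ value n list_.length ((list_.length : Int) - 1) [] (by omega)
      (by omega) (by simpa using hn)
    simp only [List.length_nil, Nat.sub_zero, List.nil_append, Nat.sub_self] at hB
    rw [hB, List.map_map]
    simp [Function.comp]
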